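-- pv_equiv track=rewrite | github.com/DavidToca/programming-challanges | kickstarted/2021/a.py | solve
-- ===== SOURCE A (Python) =====
-- def solve(s):
--     s = list(s)
--     solution = ['1']
--     longest = 1
--     last_character = s[0]
--     for c in s[1:]:
--         if ord(c) <= ord(last_character):
--             longest=1
--         else:
--             longest+=1
--
--         solution.append(str(longest))
--         last_character = c
--     return ' '.join(solution)
-- ===== SOURCE B (Python) =====
-- def solve(s):
--     cs = list(s)
--     n = len(cs)
--     # pass 1: index-driven while loop segments cs into maximal strictly-increasing runs
--     runs = []
--     run = 1
--     i = 1
--     while i < n: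
--         if ord(cs[i]) <= ord(cs[i - 1]):
--             runs.append(run)
--             run = 1
--         else:
--             run += 1
--         i += 1
--     runs.append(run)
--     # pass 2: expand each run length L into '1', '2', ..., str(L)
--     parts = [str(k) for L in runs for k in range(1, L + 1)]
--     return ' '.join(parts)
-- ===== Notes on version B (the rewrite author's own statement) =====
-- stated objective: alternative
-- what changed: Replaces A's single accumulator fold (running counter stringified and appended each step, prev carried in the state) by a two-phase decomposition: an index-driven while loop comparing cs[i] with cs[i-1] segments the string into run lengths, then a second pass expands each run length L into the fragments '1'..str(L) and joins them.
import Mathlib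
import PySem

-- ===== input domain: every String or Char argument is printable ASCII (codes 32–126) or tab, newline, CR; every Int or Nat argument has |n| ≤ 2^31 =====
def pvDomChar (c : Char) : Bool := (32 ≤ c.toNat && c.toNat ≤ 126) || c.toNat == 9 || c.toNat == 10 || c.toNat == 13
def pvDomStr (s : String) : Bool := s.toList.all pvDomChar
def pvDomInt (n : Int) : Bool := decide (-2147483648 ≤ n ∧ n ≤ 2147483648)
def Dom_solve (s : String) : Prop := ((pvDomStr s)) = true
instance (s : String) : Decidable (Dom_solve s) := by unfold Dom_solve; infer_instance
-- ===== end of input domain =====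

-- B replaces A's single accumulator fold by a two-phase decomposition: an index-driven
-- while loop segments the string into strictly-increasing run lengths, then each run
-- length L is expanded into '1'..str(L); same cost.


-- ===== PORT A =====
-- state: (solution, longest, last_character)
def solve (s : String) : String :=
  let cs := s.toList
  let st :=
    (PySem.List.slice cs (some 1) none).foldl
      (fun (st : List String × Int × Char) c =>
        let longest := if (c.toNat : Int) ≤ (st.2.2.toNat : Int) then 1 else st.2.1 + 1
        (st.1 ++ [PySem.Int.toStr longest], longest, c))
      (["1"], 1, PySem.List.pyGetD cs 0 ' ')
  PySem.Str.join " " st.1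

-- ===== PORT B =====
-- pass 1: the while loop 'while i < n: …; i += 1' carrying (runs, run)
def pvSegment (cs : List Char) (i : Int) (runs : List Int) (run : Int) : List Int × Int :=
  if h : i < (cs.length : Int) then
    (if ((PySem.List.pyGetD cs i ' ').toNat : Int) ≤ ((PySem.List.pyGetD cs (i - 1) ' ').toNat : Int) then
      pvSegment cs (i + 1) (runs ++ [run]) 1
    else
      pvSegment cs (i + 1) runs (run + 1))
  else (runs, run)
termination_by ((cs.length : Int) - i).toNat
decreasing_by all_goals omega

-- '[str(k) for k in range(1, L + 1)]'
def pvExpand (L : Int) : List String :=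
  (PySem.List.pyRange 1 (L + 1) 1).map PySem.Int.toStr

def solve_alt (s : String) : String :=
  let cs := s.toList
  let st := pvSegment cs 1 [] 1
  let runs := st.1 ++ [st.2]
  PySem.Str.join " " (runs.flatMap pvExpand)

-- ===== PRECONDITION & SPEC =====
-- A evaluates s[0], so the empty string raises IndexError: exclude it.
def Pre_solve (s : String) : Prop := s.toList ≠ []
instance (s : String) : Decidable (Pre_solve s) := by unfold Pre_solve; infer_instance
def pvWitness_solve : String := "ab"

def Spec_solve (s : String) (out : String) : Prop := out = solve_alt s
instance (s : String) (out : String) : Decidable (Spec_solve s out) := by unfold Spec_solve; infer_instance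

-- ===== CLAIM (what is proved, stated in full; the proofs are below) =====
def Claim_equal_solve : Prop := ∀ (s : String), Dom_solve s → Pre_solve s → Spec_solve s (solve s)

-- ===== LEMMAS AND PROOFS =====

-- the fold form of B's segmentation loop (proof-only reference; state (runs, run, prev))
def pvSegStep (st : List Int × Int × Char) (c : Char) : List Int × Int × Char :=
  if (c.toNat : Int) ≤ (st.2.2.toNat : Int) then (st.1 ++ [st.2.1], 1, c)
  else (st.1, st.2.1 + 1, c)

-- pvSegment at index i is the fold of pvSegStep over the suffix, prev being cs[i-1]
theorem pvSegment_eq_fold (cs : List Char) : ∀ (k : Nat) (i : Int) (runs : List Int) (run : Int),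
    1 ≤ i → (cs.length : Int) ≤ i + k →
    pvSegment cs i runs run =
      (let st := (cs.drop i.toNat).foldl pvSegStep (runs, run, PySem.List.pyGetD cs (i - 1) ' ')
       (st.1, st.2.1)) := by
  intro k
  induction k with
  | zero =>
    intro i runs run h1 hk
    rw [pvSegment]
    have hd : cs.drop i.toNat = [] := List.drop_eq_nil_of_le (by omega)
    rw [dif_neg (by omega), hd]; rfl
  | succ k ih =>
    intro i runs run h1 hk
    rw [pvSegment]
    by_cases hi : i < (cs.length : Int)
    · rw [dif_pos hi]
      have hlt : i.toNat < cs.length := by omega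
      have hd : cs.drop i.toNat = cs[i.toNat] :: cs.drop (i.toNat + 1) :=
        List.drop_eq_getElem_cons hlt
      have hci : PySem.List.pyGetD cs i ' ' = cs[i.toNat] := by
        exact PySem.List.pyGetD_eq_getElem cs ' ' (by omega) (by exact_mod_cast hi)
      have hnext : (i + 1).toNat = i.toNat + 1 := by omega
      have hprev : PySem.List.pyGetD cs (i + 1 - 1) ' ' = cs[i.toNat] := by
        have : i + 1 - 1 = i := by ring
        rw [this, hci]
      by_cases hc : ((PySem.List.pyGetD cs i ' ').toNat : Int) ≤ ((PySem.List.pyGetD cs (i - 1) ' ').toNat : Int)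
      · rw [if_pos hc, ih (i + 1) _ _ (by omega) (by omega)]
        conv_rhs => rw [hd]
        simp only [List.foldl_cons]
        have hstep : pvSegStep (runs, run, PySem.List.pyGetD cs (i - 1) ' ') cs[i.toNat]
            = (runs ++ [run], 1, cs[i.toNat]) := by
          unfold pvSegStep; rw [← hci, if_pos hc]
        rw [hstep, hnext, hprev]
      · rw [if_neg hc, ih (i + 1) _ _ (by omega) (by omega)]
        conv_rhs => rw [hd]
        simp only [List.foldl_cons]
        have hstep : pvSegStep (runs, run, PySem.List.pyGetD cs (i - 1) ' ') cs[i.toNat]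
            = (runs, run + 1, cs[i.toNat]) := by
          unfold pvSegStep; rw [← hci, if_neg hc]
        rw [hstep, hnext, hprev]
    · rw [dif_neg hi]
      have hd : cs.drop i.toNat = [] := List.drop_eq_nil_of_le (by omega)
      rw [hd]; rfl

theorem pvExpand_succ (r : Int) (h : 1 ≤ r) :
    pvExpand (r + 1) = pvExpand r ++ [PySem.Int.toStr (r + 1)] := by
  unfold pvExpand
  rw [PySem.List.pyRange_one_succ_right (by omega), List.map_append]
  simp

-- B's run-state mapped to A's accumulator state
def pvPhi (st : List Int × Int × Char) : List String × Int × Char :=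
  (st.1.flatMap pvExpand ++ pvExpand st.2.1, st.2.1, st.2.2)

-- A's fold is pvPhi of the segmentation fold
theorem pv_loop (l : List Char) :
    ∀ (st : List Int × Int × Char), 1 ≤ st.2.1 →
      l.foldl
        (fun (st : List String × Int × Char) c =>
          let longest := if (c.toNat : Int) ≤ (st.2.2.toNat : Int) then 1 else st.2.1 + 1
          (st.1 ++ [PySem.Int.toStr longest], longest, c))
        (pvPhi st)
      = pvPhi (l.foldl pvSegStep st) := by
  induction l with
  | nil => intro st h; rfl
  | cons c t ih =>
    intro st h
    obtain ⟨runs, run, prev⟩ := st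
    simp only [List.foldl_cons]
    by_cases hc : (c.toNat : Int) ≤ (prev.toNat : Int)
    · calc _ = List.foldl
            (fun (st : List String × Int × Char) c =>
              let longest := if (c.toNat : Int) ≤ (st.2.2.toNat : Int) then 1 else st.2.1 + 1
              (st.1 ++ [PySem.Int.toStr longest], longest, c))
            (pvPhi (runs ++ [run], 1, c)) t := by
            congr 1
            simp [pvPhi, hc, List.flatMap_append, show pvExpand 1 = ["1"] from rfl, show PySem.Int.toStr 1 = "1" from by decide]
        _ = _ := by rw [ih _ (by simp)]; simp [pvSegStep, hc]
    · calc _ = List.foldl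
            (fun (st : List String × Int × Char) c =>
              let longest := if (c.toNat : Int) ≤ (st.2.2.toNat : Int) then 1 else st.2.1 + 1
              (st.1 ++ [PySem.Int.toStr longest], longest, c))
            (pvPhi (runs, run + 1, c)) t := by
            congr 1
            simp [pvPhi, hc, pvExpand_succ run h]
        _ = _ := by rw [ih _ (by dsimp only at h ⊢; omega)]; simp [pvSegStep, hc]

-- ===== VERDICT (by name: the statement is the Claim_ definition above) =====
theorem solve_spec : Claim_equal_solve := by
  intro s _ _
  unfold Spec_solve solve solve_alt
  dsimp only
  rw [PySem.List.slice_from_one]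
  rw [pvSegment_eq_fold s.toList s.toList.length 1 [] 1 (by omega) (by omega)]
  have h := pv_loop s.toList.tail ([], 1, PySem.List.pyGetD s.toList 0 ' ') (by simp)
  simp only [pvPhi, show pvExpand 1 = ["1"] from rfl, List.flatMap_nil, List.nil_append] at h
  rw [h]
  simp only [show ((1 : Int)).toNat = 1 from rfl, show (1 : Int) - 1 = 0 from rfl, List.drop_one]
  simp [List.flatMap_append]
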